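-- pv_equiv track=rewrite | github.com/thejustinwalsh/three-flatland | packages/skia/scripts/generate-wgpu-bridge.py | pascal_to_kebab
-- ===== SOURCE A (Python) =====
-- def pascal_to_kebab(name: str) -> str:
--     """Convert PascalCase to kebab-case for most enums.
--
--     Examples:
--         ClampToEdge → clamp-to-edge
--         TriangleList → triangle-list
--         OneMinusSrcAlpha → one-minus-src-alpha
--         Src → src
--     """
--     result = ''
--     for i, c in enumerate(name):
--         if i > 0 and c.isupper():
--             prev = name[i-1]
--             if prev.islower() or prev.isdigit():
--                 result += '-'
--             elif prev.isupper() and i+1 < len(name) and name[i+1].islower():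
--                 result += '-'
--         result += c
--     return result.lower()
-- ===== SOURCE B (Python) =====
-- def pascal_to_kebab(name: str) -> str:
--     # Run-based tokenizer: split into maximal runs of one character class
--     # (upper / lower / digit / other), then decide dashes per run.
--     def cls(c):
--         if c.isupper():
--             return 'U'
--         if c.islower():
--             return 'L'
--         if c.isdigit():
--             return 'D'
--         return 'O'
--
--     runs = []
--     cur = ''
--     for c in name:
--         if cur and cls(cur[0]) == cls(c):
--             cur += c
--         else:
--             if cur:
--                 runs.append(cur)
--             cur = c
--     if cur:
--         runs.append(cur)
--
--     pieces = []
--     for i, run in enumerate(runs):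
--         if cls(run[0]) == 'U':
--             if i > 0 and cls(runs[i - 1][0]) in ('L', 'D'):
--                 pieces.append('-')
--             if len(run) >= 2 and i + 1 < len(runs) and cls(runs[i + 1][0]) == 'L':
--                 pieces.append(run[:-1])
--                 pieces.append('-')
--                 pieces.append(run[-1])
--             else:
--                 pieces.append(run)
--         else:
--             pieces.append(run)
--     return ''.join(pieces).lower()
-- ===== Notes on version B (the rewrite author's own statement) =====
-- stated objective: alternative
-- what changed: A decides a dash per character by peeking at name[i-1]/name[i+1]; B first tokenizes the string into maximal runs of one character class (upper/lower/digit/other) and then decides dashes per run from the neighbouring runs' classes and the run's length, splitting an acronym run before its last letter.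
import Mathlib
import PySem

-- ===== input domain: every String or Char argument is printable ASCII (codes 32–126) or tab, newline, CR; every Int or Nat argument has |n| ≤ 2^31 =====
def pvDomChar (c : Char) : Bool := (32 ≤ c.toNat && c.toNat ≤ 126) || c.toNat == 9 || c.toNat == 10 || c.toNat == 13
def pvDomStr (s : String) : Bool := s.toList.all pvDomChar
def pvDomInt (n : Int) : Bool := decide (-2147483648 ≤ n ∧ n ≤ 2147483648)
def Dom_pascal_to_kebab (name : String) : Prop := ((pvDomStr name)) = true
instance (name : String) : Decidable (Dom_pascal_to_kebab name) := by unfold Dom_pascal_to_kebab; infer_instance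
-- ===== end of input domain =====

-- B replaces A's per-character boundary scan by a run tokenizer: it splits the string into
-- maximal runs of one character class and decides dashes per run — objective: alternative.

-- ===== PORT A =====
-- A: for i, c in enumerate(name): conditionally append '-', append c; finally .lower().
def pascal_to_kebab (name : String) : String :=
  let cs := name.toList
  let result : List Char :=
    (PySem.List.enumerate cs 0).foldl (fun result p =>
      let result :=
        if p.1 > 0 && PySem.Chars.isupper p.2 then
          let prev := PySem.List.pyGetD cs (p.1 - 1) ' '
          if PySem.Chars.islower prev || PySem.Chars.isdigit prev then
            result ++ ['-']
          else if PySem.Chars.isupper prev &&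
                  (decide (p.1 + 1 < PySem.List.len cs) &&
                   PySem.Chars.islower (PySem.List.pyGetD cs (p.1 + 1) ' ')) then
            result ++ ['-']
          else result
        else result
      result ++ [p.2]) []
  String.mk (PySem.Chars.lower result)

-- ===== PORT B =====
-- B-side helper: the character class 'U'/'L'/'D'/'O' (B's cls()).
def pvCls (c : Char) : Char :=
  if PySem.Chars.isupper c then 'U'
  else if PySem.Chars.islower c then 'L'
  else if PySem.Chars.isdigit c then 'D'
  else 'O'

-- B: pass 1 folds the chars into maximal same-class runs; pass 2 walks the runs with
-- index lookups at runs[i-1]/runs[i+1] and emits the pieces; join and lower at the end.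
def pascal_to_kebab_alt (name : String) : String :=
  let cs := name.toList
  let st := cs.foldl (fun (st : List (List Char) × List Char) c =>
      if !st.2.isEmpty && (pvCls (st.2.headD ' ') == pvCls c) then
        (st.1, st.2 ++ [c])
      else
        ((if st.2.isEmpty then st.1 else st.1 ++ [st.2]), [c])) ([], [])
  let runs := if st.2.isEmpty then st.1 else st.1 ++ [st.2]
  let pieces := (PySem.List.enumerate runs 0).foldl (fun pieces p =>
      if pvCls (p.2.headD ' ') == 'U' then
        let pieces :=
          if p.1 > 0 &&
              (let pk := pvCls ((PySem.List.pyGetD runs (p.1 - 1) []).headD ' ')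
               pk == 'L' || pk == 'D') then
            pieces ++ [['-']]
          else pieces
        if decide (2 ≤ p.2.length) &&
            (decide (p.1 + 1 < PySem.List.len runs) &&
             (pvCls ((PySem.List.pyGetD runs (p.1 + 1) []).headD ' ') == 'L')) then
          pieces ++ [p.2.dropLast] ++ [['-']] ++ [[p.2.getLastD ' ']]
        else pieces ++ [p.2]
      else pieces ++ [p.2]) []
  String.mk (PySem.Chars.lower (PySem.Chars.join [] pieces))

-- ===== PRECONDITION & SPEC =====
def Spec_pascal_to_kebab (name : String) (out : String) : Prop := out = pascal_to_kebab_alt name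
instance (name : String) (out : String) : Decidable (Spec_pascal_to_kebab name out) := by unfold Spec_pascal_to_kebab; infer_instance

-- ===== CLAIM (what is proved, stated in full; the proofs are below) =====
def Claim_equal_pascal_to_kebab : Prop := ∀ (name : String), Dom_pascal_to_kebab name → Spec_pascal_to_kebab name (pascal_to_kebab name)

-- ===== LEMMAS AND PROOFS =====

-- character-class facts (ASCII ranges are disjoint)
lemma pv_upper_not_lower (c : Char) (h : PySem.Chars.isupper c = true) :
    PySem.Chars.islower c = false := by
  simp only [PySem.Chars.isupper, PySem.Chars.islower, Char.le_def] at *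
  rcases c with ⟨v, _⟩
  simp_all [UInt32.le_iff_toNat_le]
  omega

lemma pv_upper_not_digit (c : Char) (h : PySem.Chars.isupper c = true) :
    PySem.Chars.isdigit c = false := by
  simp only [PySem.Chars.isupper, PySem.Chars.isdigit, Char.le_def] at *
  rcases c with ⟨v, _⟩
  simp_all [UInt32.le_iff_toNat_le]
  omega

lemma pv_lower_not_digit (c : Char) (h : PySem.Chars.islower c = true) :
    PySem.Chars.isdigit c = false := by
  simp only [PySem.Chars.islower, PySem.Chars.isdigit, Char.le_def] at *
  rcases c with ⟨v, _⟩
  simp_all [UInt32.le_iff_toNat_le]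
  omega

lemma pvCls_U_iff (c : Char) : pvCls c = 'U' ↔ PySem.Chars.isupper c = true := by
  unfold pvCls; split_ifs <;> simp_all

lemma pvCls_L_iff (c : Char) : pvCls c = 'L' ↔ PySem.Chars.islower c = true := by
  unfold pvCls
  split_ifs with h1 h2 h3
  · exact iff_of_false (by decide) (by simp [pv_upper_not_lower c h1])
  · exact iff_of_true rfl h2
  · exact iff_of_false (by decide) (by simp [h2])
  · exact iff_of_false (by decide) (by simp [h2])

lemma pvCls_D_iff (c : Char) : pvCls c = 'D' ↔ PySem.Chars.isdigit c = true := by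
  unfold pvCls
  split_ifs with h1 h2 h3
  · exact iff_of_false (by decide) (by simp [pv_upper_not_digit c h1])
  · exact iff_of_false (by decide) (by simp [pv_lower_not_digit c h2])
  · exact iff_of_true rfl h3
  · exact iff_of_false (by decide) (by simp [h3])

lemma pvCls_not_U (c : Char) (h : pvCls c ≠ 'U') : PySem.Chars.isupper c = false := by
  by_contra hc
  exact h ((pvCls_U_iff c).mpr (by simpa using hc))

-- A's dash decision on an optional previous / next character
def pvDash (p : Option Char) (c : Char) (n : Option Char) : List Char :=
  match p with
  | none => []
  | some p =>
    if PySem.Chars.isupper c &&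
        (PySem.Chars.islower p || PySem.Chars.isdigit p ||
          (PySem.Chars.isupper p &&
            (match n with | some n => PySem.Chars.islower n | none => false))) then ['-'] else []

-- per-char recursion carrying the previous character
def pvRecA : Option Char → List Char → List Char
  | _, [] => []
  | p, c :: rest => pvDash p c rest.head? ++ c :: pvRecA (some c) rest

-- per-run recursion carrying the previous run
def pvPrev (q : Option (List Char)) : List Char :=
  match q with
  | none => []
  | some pr => if pvCls (pr.headD ' ') == 'L' || pvCls (pr.headD ' ') == 'D' then ['-'] else []

def pvGB (q : Option (List Char)) (r : List Char) (n : Option (List Char)) : List Char :=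
  if pvCls (r.headD ' ') == 'U' then
    pvPrev q ++
    (if decide (2 ≤ r.length) &&
        (match n with | none => false | some nr => pvCls (nr.headD ' ') == 'L') then
       r.dropLast ++ '-' :: [r.getLastD ' ']
     else r)
  else r

def pvRecB : Option (List Char) → List (List Char) → List Char
  | _, [] => []
  | q, r :: rs => pvGB q r rs.head? ++ pvRecB (some r) rs

-- the run decomposition B's first pass computes
def pvChunk : List Char → List (List Char)
  | [] => []
  | c :: rest =>
    (c :: rest.takeWhile (fun d => pvCls c == pvCls d)) ::
      pvChunk (rest.dropWhile (fun d => pvCls c == pvCls d))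
  termination_by l => l.length
  decreasing_by
    simp only [List.length_cons]
    have := List.length_dropWhile_le (fun d => pvCls c == pvCls d) rest
    omega

-- shifted-triples view of a list, with previous-element context
def pvTrips {α : Type} : Option α → List α → List (Option α × α × Option α)
  | _, [] => []
  | p, c :: rest => (p, c, rest.head?) :: pvTrips (some c) rest

lemma pvTrips_length {α : Type} (p : Option α) (l : List α) : (pvTrips p l).length = l.length := by
  induction l generalizing p with
  | nil => rfl
  | cons c rest ih => simp [pvTrips, ih]

lemma pvTrips_getElem {α : Type} (p : Option α) (l : List α) (k : Nat) (hk : k < l.length) :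
    (pvTrips p l)[k]'(by rw [pvTrips_length]; exact hk)
      = ((p :: l.map some)[k]'(by simp; omega), l[k], l[k+1]?) := by
  induction l generalizing p k with
  | nil => simp at hk
  | cons c rest ih =>
    cases k with
    | zero => simp [pvTrips, List.head?_eq_getElem?]
    | succ k =>
      simp only [pvTrips, List.getElem_cons_succ, List.map_cons, List.getElem?_cons_succ]
      rw [ih (some c) k (by simpa using hk)]


-- ---------- A side ----------

def pvPieceA (cs : List Char) (p : Int × Char) : List Char :=
  (if p.1 > 0 && PySem.Chars.isupper p.2 &&
      (let prev := PySem.List.pyGetD cs (p.1 - 1) ' '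
       PySem.Chars.islower prev || PySem.Chars.isdigit prev ||
         (PySem.Chars.isupper prev &&
           (decide (p.1 + 1 < PySem.List.len cs) &&
            PySem.Chars.islower (PySem.List.pyGetD cs (p.1 + 1) ' '))))
   then ['-'] else []) ++ [p.2]

lemma pvA_step (cs : List Char) (acc : List Char) (p : Int × Char) :
    ((if p.1 > 0 && PySem.Chars.isupper p.2 then
        let prev := PySem.List.pyGetD cs (p.1 - 1) ' '
        if PySem.Chars.islower prev || PySem.Chars.isdigit prev then acc ++ ['-']
        else if PySem.Chars.isupper prev &&
                (decide (p.1 + 1 < PySem.List.len cs) &&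
                 PySem.Chars.islower (PySem.List.pyGetD cs (p.1 + 1) ' ')) then acc ++ ['-']
        else acc
      else acc) ++ [p.2]) = acc ++ pvPieceA cs p := by
  simp only [pvPieceA]
  by_cases h1 : (p.1 > 0 && PySem.Chars.isupper p.2) = true <;>
    simp only [h1, Bool.false_eq_true, if_true, if_false] <;> split_ifs <;> simp_all

lemma pvA_foldl (cs : List Char) (l : List (Int × Char)) (acc : List Char) :
    (l.foldl (fun result p =>
        let result :=
          if p.1 > 0 && PySem.Chars.isupper p.2 then
            let prev := PySem.List.pyGetD cs (p.1 - 1) ' '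
            if PySem.Chars.islower prev || PySem.Chars.isdigit prev then
              result ++ ['-']
            else if PySem.Chars.isupper prev &&
                    (decide (p.1 + 1 < PySem.List.len cs) &&
                     PySem.Chars.islower (PySem.List.pyGetD cs (p.1 + 1) ' ')) then
              result ++ ['-']
            else result
          else result
        result ++ [p.2]) acc)
      = acc ++ (l.map (pvPieceA cs)).flatten := by
  induction l generalizing acc with
  | nil => simp
  | cons p l ih =>
    simp only [List.foldl_cons, List.map_cons, List.flatten_cons]
    rw [ih]
    conv_lhs => rw [show (if p.1 > 0 && PySem.Chars.isupper p.2 then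
          let prev := PySem.List.pyGetD cs (p.1 - 1) ' '
          if PySem.Chars.islower prev || PySem.Chars.isdigit prev then acc ++ ['-']
          else if PySem.Chars.isupper prev &&
                  (decide (p.1 + 1 < PySem.List.len cs) &&
                   PySem.Chars.islower (PySem.List.pyGetD cs (p.1 + 1) ' ')) then acc ++ ['-']
          else acc
        else acc) ++ [p.2] = acc ++ pvPieceA cs p from pvA_step cs acc p]
    simp [List.append_assoc]

lemma pvPieceA_eq (cs : List Char) (k : Nat) (hk : k < cs.length) :
    pvPieceA cs ((k : Int), cs[k])
      = pvDash ((none :: cs.map some)[k]'(by simp; omega)) cs[k] cs[k+1]? ++ [cs[k]] := by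
  unfold pvPieceA pvDash
  congr 1
  rcases k with _ | k
  · simp
  · have hprev : (none :: cs.map some)[k+1]'(by simp; omega) = some (cs[k]'(by omega)) := by simp
    rw [hprev]
    have hgp : PySem.List.pyGetD cs ((((k+1 : Nat)) : Int) - 1) ' ' = cs[k]'(by omega) := by
      have : ((((k+1 : Nat)) : Int) - 1) = ((k : Nat) : Int) := by push_cast; ring
      rw [this, PySem.List.pyGetD_natCast]
      exact List.getD_eq_getElem _ _ _
    simp only [hgp]
    by_cases hnext : k + 2 < cs.length
    · have h1 : cs[k+1+1]? = some (cs[k+2]'(by omega)) := by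
        rw [List.getElem?_eq_getElem (by omega)]
      rw [h1]
      have hgn : PySem.List.pyGetD cs ((((k+1 : Nat)) : Int) + 1) ' ' = cs[k+2]'(by omega) := by
        have : ((((k+1 : Nat)) : Int) + 1) = (((k+2 : Nat)) : Int) := by push_cast; ring
        rw [this, PySem.List.pyGetD_natCast]
        exact List.getD_eq_getElem _ _ _
      rw [hgn]
      have hlt : ((k : Int) + 1 + 1 < (cs.length : Int)) := by omega
      simp [hlt]
    · have h1 : cs[k+1+1]? = none := by
        rw [List.getElem?_eq_none (by omega)]
      rw [h1]
      have hlt : ¬ ((k : Int) + 1 + 1 < (cs.length : Int)) := by omega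
      simp [hlt]

lemma pvA_maps (cs : List Char) :
    (PySem.List.enumerate cs 0).map (pvPieceA cs)
      = (pvTrips none cs).map (fun t => pvDash t.1 t.2.1 t.2.2 ++ [t.2.1]) := by
  apply List.ext_getElem
  · simp [PySem.List.length_enumerate, pvTrips_length]
  · intro k h1 h2
    have hk : k < cs.length := by simpa [PySem.List.length_enumerate] using h1
    rw [List.getElem_map, List.getElem_map]
    rw [PySem.List.getElem_enumerate]
    rw [pvTrips_getElem none cs k hk]
    simpa using pvPieceA_eq cs k hk

lemma pvA_rec (cs : List Char) (p : Option Char) :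
    ((pvTrips p cs).map (fun t => pvDash t.1 t.2.1 t.2.2 ++ [t.2.1])).flatten = pvRecA p cs := by
  induction cs generalizing p with
  | nil => rfl
  | cons c rest ih => simp [pvTrips, pvRecA, ih]

lemma pvA_char (name : String) :
    pascal_to_kebab name = String.mk (PySem.Chars.lower (pvRecA none name.toList)) := by
  unfold pascal_to_kebab
  simp only []
  rw [pvA_foldl name.toList (PySem.List.enumerate name.toList 0) []]
  rw [List.nil_append, pvA_maps, pvA_rec]

-- ---------- B side, pass 1: the fold computes pvChunk ----------

lemma pvB1_fold (cs : List Char) (runs : List (List Char)) (c : Char) (cur : List Char) :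
    (let st := cs.foldl (fun (st : List (List Char) × List Char) c =>
        if !st.2.isEmpty && (pvCls (st.2.headD ' ') == pvCls c) then
          (st.1, st.2 ++ [c])
        else
          ((if st.2.isEmpty then st.1 else st.1 ++ [st.2]), [c])) (runs, c :: cur)
      if st.2.isEmpty then st.1 else st.1 ++ [st.2])
      = runs ++ (((c :: cur) ++ cs.takeWhile (fun d => pvCls c == pvCls d)) ::
          pvChunk (cs.dropWhile (fun d => pvCls c == pvCls d))) := by
  induction cs generalizing runs c cur with
  | nil => simp [pvChunk]
  | cons d cs' ih =>
    simp only [List.foldl_cons, List.takeWhile_cons, List.dropWhile_cons]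
    by_cases h : (pvCls c == pvCls d) = true
    · simp only [h, if_true, List.isEmpty_cons, Bool.not_false, List.headD_cons, Bool.true_and]
      have := ih runs c (cur ++ [d])
      simp only [List.cons_append, List.append_assoc] at this ⊢
      rw [this]
      simp
    · simp only [h, Bool.and_false, Bool.false_eq_true, if_false, List.isEmpty_cons,
        List.headD_cons]
      have := ih (runs ++ [c :: cur]) d []
      simp only [List.nil_append, List.append_assoc] at this
      rw [this]
      rw [pvChunk]
      simp

lemma pvB_runs (cs : List Char) :
    (let st := cs.foldl (fun (st : List (List Char) × List Char) c =>
        if !st.2.isEmpty && (pvCls (st.2.headD ' ') == pvCls c) then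
          (st.1, st.2 ++ [c])
        else
          ((if st.2.isEmpty then st.1 else st.1 ++ [st.2]), [c])) ([], [])
      if st.2.isEmpty then st.1 else st.1 ++ [st.2])
      = pvChunk cs := by
  cases cs with
  | nil => simp [pvChunk]
  | cons c rest =>
    simp only [List.foldl_cons]
    have h0 : (if (!(([] : List Char)).isEmpty && (pvCls ((([] : List Char)).headD ' ') == pvCls c)) = true then
        (([] : List (List Char)), ([] : List Char) ++ [c])
      else ((if (([] : List Char)).isEmpty then ([] : List (List Char)) else [] ++ [[]]), [c])) = ([], [c]) := by
      simp
    rw [h0]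
    have := pvB1_fold rest [] c []
    simp only [List.nil_append] at this ⊢
    rw [this]
    rw [pvChunk]
    simp

-- ---------- B side, pass 2: the fold emits pvRecB over the runs ----------

def pvPieceB (runs : List (List Char)) (p : Int × List Char) : List (List Char) :=
  if pvCls (p.2.headD ' ') == 'U' then
    (if p.1 > 0 &&
        (let pk := pvCls ((PySem.List.pyGetD runs (p.1 - 1) []).headD ' ')
         pk == 'L' || pk == 'D') then [['-']] else []) ++
    (if decide (2 ≤ p.2.length) &&
        (decide (p.1 + 1 < PySem.List.len runs) &&
         (pvCls ((PySem.List.pyGetD runs (p.1 + 1) []).headD ' ') == 'L')) then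
       [p.2.dropLast] ++ [['-']] ++ [[p.2.getLastD ' ']]
     else [p.2])
  else [p.2]

lemma pvB2_fold (runs : List (List Char)) (l : List (Int × List Char)) (acc : List (List Char)) :
    (l.foldl (fun pieces p =>
      if pvCls (p.2.headD ' ') == 'U' then
        let pieces :=
          if p.1 > 0 &&
              (let pk := pvCls ((PySem.List.pyGetD runs (p.1 - 1) []).headD ' ')
               pk == 'L' || pk == 'D') then
            pieces ++ [['-']]
          else pieces
        if decide (2 ≤ p.2.length) &&
            (decide (p.1 + 1 < PySem.List.len runs) &&
             (pvCls ((PySem.List.pyGetD runs (p.1 + 1) []).headD ' ') == 'L')) then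
          pieces ++ [p.2.dropLast] ++ [['-']] ++ [[p.2.getLastD ' ']]
        else pieces ++ [p.2]
      else pieces ++ [p.2]) acc)
      = acc ++ (l.map (pvPieceB runs)).flatten := by
  induction l generalizing acc with
  | nil => simp
  | cons p l ih =>
    simp only [List.foldl_cons, List.map_cons, List.flatten_cons]
    rw [ih]
    unfold pvPieceB
    split_ifs <;> simp_all [List.append_assoc]

def pvGBflat (t : Option (List Char) × List Char × Option (List Char)) : List Char :=
  pvGB t.1 t.2.1 t.2.2

lemma pvPieceB_eq (runs : List (List Char)) (k : Nat) (hk : k < runs.length) :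
    (pvPieceB runs ((k : Int), runs[k])).flatten
      = pvGB ((none :: runs.map some)[k]'(by simp; omega)) runs[k] runs[k+1]? := by
  unfold pvPieceB pvGB
  by_cases hU : (pvCls (runs[k].headD ' ') == 'U') = true
  · simp only [hU, if_true, List.flatten_append]
    congr 1
    · rcases k with _ | k
      · simp [pvPrev]
      · have hprev : (none :: runs.map some)[k+1]'(by simp; omega) = some (runs[k]'(by omega)) := by simp
        rw [hprev]
        have hgp : PySem.List.pyGetD runs ((((k+1 : Nat)) : Int) - 1) [] = runs[k]'(by omega) := by
          have : ((((k+1 : Nat)) : Int) - 1) = ((k : Nat) : Int) := by push_cast; ring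
          rw [this, PySem.List.pyGetD_natCast]
          exact List.getD_eq_getElem _ _ _
        simp only [hgp]
        split_ifs <;> simp_all [pvPrev]
    · by_cases hnext : k + 1 < runs.length
      · have h1 : runs[k+1]? = some (runs[k+1]'(by omega)) := by
          rw [List.getElem?_eq_getElem (by omega)]
        rw [h1]
        have hgn : PySem.List.pyGetD runs (((k : Nat) : Int) + 1) [] = runs[k+1]'(by omega) := by
          have : (((k : Nat) : Int) + 1) = (((k+1 : Nat)) : Int) := by push_cast; ring
          rw [this, PySem.List.pyGetD_natCast]
          exact List.getD_eq_getElem _ _ _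
        rw [hgn]
        have hlt : ((k : Int) + 1 < (runs.length : Int)) := by omega
        simp only [PySem.List.len, hlt, decide_true, Bool.true_and]
        split_ifs <;> simp
      · have h1 : runs[k+1]? = none := by rw [List.getElem?_eq_none (by omega)]
        rw [h1]
        have hlt : ¬ ((k : Int) + 1 < (runs.length : Int)) := by omega
        simp only [PySem.List.len, hlt, decide_false, Bool.false_and, Bool.and_false,
          Bool.false_eq_true, if_false]
        simp
  · simp only [hU, Bool.false_eq_true, if_false]
    simp

lemma pv_flatten_flatten {γ : Type} (l : List γ) (f : γ → List (List Char)) :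
    ((l.map f).flatten).flatten = (l.map (fun x => (f x).flatten)).flatten := by
  induction l with
  | nil => rfl
  | cons x l ih => simp [ih]

lemma pvB_maps (runs : List (List Char)) :
    ((PySem.List.enumerate runs 0).map (pvPieceB runs)).flatten.flatten
      = ((pvTrips none runs).map pvGBflat).flatten := by
  have hmap : ((PySem.List.enumerate runs 0).map (fun p => (pvPieceB runs p).flatten))
      = (pvTrips none runs).map pvGBflat := by
    apply List.ext_getElem
    · simp [PySem.List.length_enumerate, pvTrips_length]
    · intro k h1 h2
      have hk : k < runs.length := by simpa [PySem.List.length_enumerate] using h1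
      rw [List.getElem_map, List.getElem_map]
      rw [PySem.List.getElem_enumerate]
      rw [pvTrips_getElem none runs k hk]
      simpa [pvGBflat] using pvPieceB_eq runs k hk
  rw [pv_flatten_flatten, hmap]

lemma pvB_rec (runs : List (List Char)) (q : Option (List Char)) :
    ((pvTrips q runs).map pvGBflat).flatten = pvRecB q runs := by
  induction runs generalizing q with
  | nil => rfl
  | cons r rs ih => simp [pvTrips, pvRecB, pvGBflat, ih]

lemma pvJoin_flatten (ls : List (List Char)) : PySem.Chars.join [] ls = ls.flatten := by
  induction ls with
  | nil => rfl
  | cons a ls ih =>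
    cases ls with
    | nil => simp [PySem.Chars.join_singleton]
    | cons b t =>
      rw [PySem.Chars.join_cons_cons, ih]
      simp

lemma pvB_char (name : String) :
    pascal_to_kebab_alt name = String.mk (PySem.Chars.lower (pvRecB none (pvChunk name.toList))) := by
  unfold pascal_to_kebab_alt
  simp only []
  rw [pvB_runs name.toList]
  rw [pvB2_fold (pvChunk name.toList) _ []]
  rw [List.nil_append, pvJoin_flatten, pvB_maps, pvB_rec]

lemma pvRunN (s : List Char) (p : Option Char) (t : List Char)
    (hall : ∀ d ∈ s, PySem.Chars.isupper d = false) :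
    pvRecA p (s ++ t) = s ++ pvRecA (match s.getLast? with
      | some g => some g
      | none => p) t := by
  induction s generalizing p with
  | nil => simp
  | cons e s' ih =>
    simp only [List.cons_append, pvRecA]
    have he : PySem.Chars.isupper e = false := hall e (by simp)
    have hd : pvDash p e (s' ++ t).head? = [] := by
      unfold pvDash
      cases p with
      | none => rfl
      | some pc => simp [he]
    rw [hd, List.nil_append]
    rw [ih (some e) (fun d hd' => hall d (by simp [hd']))]
    cases s' with
    | nil => simp
    | cons f s'' =>
      cases hgl : (f :: s'').getLast? with
      | none => simp [List.getLast?_eq_none_iff] at hgl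
      | some g => simp only [List.getLast?_cons_cons, hgl]

lemma pvRunU (s : List Char) (c : Char) (t : List Char) (hs : s ≠ [])
    (hall : ∀ d ∈ s, PySem.Chars.isupper d = true)
    (hc : PySem.Chars.isupper c = true) :
    pvRecA (some c) (s ++ t) =
      s.dropLast ++
        ((match t.head? with
         | some nh => if PySem.Chars.islower nh then ['-'] else []
         | none => ([] : List Char)) ++
        (s.getLastD ' ') :: pvRecA (some (s.getLastD ' ')) t) := by
  induction s generalizing c with
  | nil => exact absurd rfl hs
  | cons e s' ih =>
    have he : PySem.Chars.isupper e = true := hall e (by simp)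
    cases s' with
    | nil =>
      simp only [List.cons_append, pvRecA, List.nil_append, List.getLastD_cons, List.getLastD_nil,
        List.dropLast]
      have hd : pvDash (some c) e t.head? =
          (match t.head? with
           | some nh => if PySem.Chars.islower nh then ['-'] else []
           | none => ([] : List Char)) := by
        unfold pvDash
        have h1 := pv_upper_not_lower c hc
        have h2 := pv_upper_not_digit c hc
        cases t.head? with
        | none => simp [he, h1, h2, hc]
        | some nh => by_cases hl : PySem.Chars.islower nh = true <;> simp [he, h1, h2, hc, hl]
      rw [hd]
    | cons e2 s'' =>
      simp only [List.cons_append, pvRecA]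
      have he2 : PySem.Chars.isupper e2 = true := hall e2 (by simp)
      have hd : pvDash (some c) e (e2 :: (s'' ++ t)).head? = [] := by
        unfold pvDash
        have h1 := pv_upper_not_lower c hc
        have h2 := pv_upper_not_digit c hc
        simp [he, h1, h2, hc, pv_upper_not_lower e2 he2]
      rw [hd, List.nil_append]
      have := ih e (by simp) (fun d hd' => hall d (List.mem_cons_of_mem _ hd')) he
      simp only [List.cons_append] at this
      rw [show pvDash (some e) e2 (s'' ++ t).head? ++ e2 :: pvRecA (some e2) (s'' ++ t)
            = pvRecA (some e) (e2 :: (s'' ++ t)) from rfl]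
      rw [this]
      simp [List.getLastD_cons]

lemma pvDash_notU (p : Option Char) (c : Char) (nh : Option Char)
    (hc : PySem.Chars.isupper c = false) : pvDash p c nh = [] := by
  cases p with
  | none => rfl
  | some pc => simp [pvDash, hc]

lemma pvDash_U (pc c prh : Char) (nh : Option Char)
    (hcls : pvCls pc = pvCls prh)
    (hcU : PySem.Chars.isupper c = true)
    (hnotU : PySem.Chars.isupper pc = false) :
    pvDash (some pc) c nh =
      (if pvCls prh == 'L' || pvCls prh == 'D' then ['-'] else []) := by
  unfold pvDash
  rw [← hcls]
  by_cases hl : PySem.Chars.islower pc = true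
  · simp [hcU, hl, (pvCls_L_iff pc).mpr hl]
  · by_cases hdg : PySem.Chars.isdigit pc = true
    · simp [hcU, hl, hdg, (pvCls_D_iff pc).mpr hdg]
    · have hL : pvCls pc ≠ 'L' := fun h => hl ((pvCls_L_iff pc).mp h)
      have hD : pvCls pc ≠ 'D' := fun h => hdg ((pvCls_D_iff pc).mp h)
      simp [hcU, hl, hdg, hnotU, hL, hD]

lemma pvDash_both (c : Char) (p : Option Char) (q : Option (List Char))
    (hpq : match p, q with
           | none, none => True
           | some pc, some pr => pvCls pc = pvCls (pr.headD ' ')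
           | _, _ => False)
    (hbc : ∀ pc, p = some pc → pvCls pc ≠ pvCls c)
    (hcls_c : pvCls c = 'U') (nh : Option Char) :
    pvDash p c nh = pvPrev q := by
  cases p with
  | none =>
    cases q with
    | none => rfl
    | some pr => exact hpq.elim
  | some pc =>
    cases q with
    | none => exact hpq.elim
    | some pr =>
      have hnotU : PySem.Chars.isupper pc = false := by
        apply pvCls_not_U
        intro h
        exact hbc pc rfl (h.trans hcls_c.symm)
      exact pvDash_U pc c (pr.headD ' ') nh hpq ((pvCls_U_iff c).mp hcls_c) hnotU

lemma pv_dropLast_last (s : List Char) (hs : s ≠ []) (x : List Char) :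
    s.dropLast ++ (s.getLast?.getD ' ') :: x = s ++ x := by
  conv_rhs => rw [← List.dropLast_concat_getLast hs]
  rw [List.getLast?_eq_getLast hs]
  simp

lemma pvNext_eq (rest' : List Char) :
    (match (pvChunk rest').head? with
     | none => false
     | some nr => pvCls (nr.headD ' ') == 'L')
      = (match rest'.head? with
         | none => false
         | some h0 => pvCls h0 == 'L') := by
  cases rest' with
  | nil => rw [pvChunk]; rfl
  | cons h0 t0 => rw [pvChunk]; simp

lemma pvCore_aux : ∀ (n : Nat) (cs : List Char) (p : Option Char) (q : Option (List Char)),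
    cs.length ≤ n →
    (match p, q with
     | none, none => True
     | some pc, some pr => pvCls pc = pvCls (pr.headD ' ')
     | _, _ => False) →
    (∀ c0 pc, cs.head? = some c0 → p = some pc → pvCls pc ≠ pvCls c0) →
    pvRecA p cs = pvRecB q (pvChunk cs) := by
  intro n
  induction n with
  | zero =>
    intro cs p q hlen hpq hb
    have hcs : cs = [] := by cases cs with | nil => rfl | cons c r => simp at hlen
    subst hcs
    simp [pvChunk, pvRecA, pvRecB]
  | succ n ih =>
    intro cs p q hlen hpq hb
    cases cs with
    | nil => simp [pvChunk, pvRecA, pvRecB]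
    | cons c rest =>
      rw [pvChunk]
      set s := rest.takeWhile (fun d => pvCls c == pvCls d) with hsdef
      set rest' := rest.dropWhile (fun d => pvCls c == pvCls d) with hrdef
      have hsplit : s ++ rest' = rest := List.takeWhile_append_dropWhile
      have hsall : ∀ d ∈ s, pvCls d = pvCls c := by
        intro d hd
        rw [hsdef] at hd
        have := List.mem_takeWhile_imp hd
        exact (beq_iff_eq.mp this).symm
      have hrhead : ∀ h0, rest'.head? = some h0 → pvCls h0 ≠ pvCls c := by
        intro h0 hh heq
        have h2 := List.head?_dropWhile_not (fun d => pvCls c == pvCls d) rest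
        rw [← hrdef, hh] at h2
        simp only [beq_eq_false_iff_ne, ne_eq] at h2
        exact h2 heq.symm
      have hlen' : rest'.length ≤ n := by
        have h1 := List.length_dropWhile_le (fun d => pvCls c == pvCls d) rest
        simp only [List.length_cons] at hlen
        rw [hrdef]
        omega
      have hbc : ∀ pc, p = some pc → pvCls pc ≠ pvCls c := by
        intro pc hp
        exact hb c pc rfl hp
      -- unfold one step on each side
      rw [show pvRecA p (c :: rest) = pvDash p c rest.head? ++ c :: pvRecA (some c) rest from rfl]
      rw [show pvRecB q ((c :: s) :: pvChunk rest')
            = pvGB q (c :: s) (pvChunk rest').head? ++ pvRecB (some (c :: s)) (pvChunk rest')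
          from rfl]
      rw [← hsplit]
      by_cases hU : pvCls c = 'U'
      · have hcU : PySem.Chars.isupper c = true := (pvCls_U_iff c).mp hU
        rw [pvDash_both c p q hpq hbc hU]
        by_cases hsnil : s = []
        · rw [hsnil]
          simp only [List.nil_append]
          have hgb : pvGB q [c] (pvChunk rest').head? = pvPrev q ++ [c] := by
            unfold pvGB
            simp only [List.headD_cons, hU, beq_self_eq_true, if_true]
            norm_num
          rw [hgb]
          have hrec : pvRecA (some c) rest' = pvRecB (some [c]) (pvChunk rest') := by
            apply ih rest' (some c) (some [c]) hlen'
            · simp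
            · intro c0 pc hh hp heq
              cases hp
              exact hrhead c0 hh heq.symm
          rw [hrec]
          simp
        · have hsU : ∀ d ∈ s, PySem.Chars.isupper d = true := by
            intro d hd
            exact (pvCls_U_iff d).mp ((hsall d hd).trans hU)
          have hglmem : s.getLastD ' ' ∈ s := by
            cases hgl : s.getLast? with
            | none => rw [List.getLast?_eq_none_iff] at hgl; exact absurd hgl hsnil
            | some g =>
              rw [List.getLastD_eq_getLast?, hgl]
              exact List.mem_of_getLast? hgl
          have hglcls : pvCls (s.getLastD ' ') = pvCls c := hsall _ hglmem
          rw [pvRunU s c rest' hsnil hsU hcU]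
          have hgb : pvGB q (c :: s) (pvChunk rest').head? =
              pvPrev q ++
                (if (match rest'.head? with
                     | none => false
                     | some h0 => pvCls h0 == 'L') then
                   (c :: s.dropLast) ++ '-' :: [s.getLastD ' ']
                 else c :: s) := by
            unfold pvGB
            simp only [List.headD_cons, hU, beq_self_eq_true, if_true, pvNext_eq]
            have hlen2 : decide (2 ≤ (c :: s).length) = true := by
              have := List.length_pos_iff.mpr hsnil
              simp
              omega
            rw [hlen2, Bool.true_and]
            have hdl : (c :: s).dropLast = c :: s.dropLast := List.dropLast_cons_of_ne_nil hsnil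
            have hgl2 : (c :: s).getLastD ' ' = s.getLastD ' ' := by
              rw [List.getLastD_cons]
              cases hgl : s.getLast? with
              | none => rw [List.getLast?_eq_none_iff] at hgl; exact absurd hgl hsnil
              | some g => rw [List.getLastD_eq_getLast?, List.getLastD_eq_getLast?, hgl]; rfl
            rw [hdl, hgl2]
          rw [hgb]
          have hrec : pvRecA (some (s.getLastD ' ')) rest'
              = pvRecB (some (c :: s)) (pvChunk rest') := by
            apply ih rest' _ _ hlen'
            · simpa using hglcls
            · intro c0 pc hh hp heq
              cases hp
              exact hrhead c0 hh (heq.symm.trans hglcls)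
          rw [hrec]
          cases hnx : rest'.head? with
          | none =>
            simp only [List.getLastD_eq_getLast?, List.nil_append]
            rw [pv_dropLast_last s hsnil]
            simp
          | some h0 =>
            by_cases hl : PySem.Chars.islower h0 = true
            · have : (pvCls h0 == 'L') = true := by simp [(pvCls_L_iff h0).mpr hl]
              simp only [this, hl, if_true]
              simp
            · have : (pvCls h0 == 'L') = false := by
                simp only [beq_eq_false_iff_ne, ne_eq]
                intro h
                exact hl ((pvCls_L_iff h0).mp h)
              simp only [this, Bool.false_eq_true, hl, if_false]
              simp only [List.getLastD_eq_getLast?, List.nil_append]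
              rw [pv_dropLast_last s hsnil]
              simp
      · have hcNU : PySem.Chars.isupper c = false := pvCls_not_U c hU
        rw [pvDash_notU p c _ hcNU, List.nil_append]
        have hsNU : ∀ d ∈ s, PySem.Chars.isupper d = false := by
          intro d hd
          apply pvCls_not_U
          rw [hsall d hd]
          exact hU
        rw [pvRunN s (some c) rest' hsNU]
        have hgb : pvGB q (c :: s) (pvChunk rest').head? = c :: s := by
          unfold pvGB
          have : (pvCls (( c :: s).headD ' ') == 'U') = false := by
            simp only [List.headD_cons, beq_eq_false_iff_ne, ne_eq]
            exact hU
          rw [this]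
          simp
        rw [hgb]
        have hglA : ∃ gc, (match s.getLast? with
            | some g => some g
            | none => some c) = some gc ∧ pvCls gc = pvCls c := by
          cases hgl : s.getLast? with
          | none => exact ⟨c, rfl, rfl⟩
          | some g => exact ⟨g, rfl, hsall g (List.mem_of_getLast? hgl)⟩
        obtain ⟨gc, hgc, hgccls⟩ := hglA
        rw [hgc]
        have hrec : pvRecA (some gc) rest'
            = pvRecB (some (c :: s)) (pvChunk rest') := by
          apply ih rest' _ _ hlen'
          · simpa using hgccls
          · intro c0 pc hh hp heq
            cases hp
            apply hrhead c0 hh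
            rw [← hgccls]
            exact heq.symm
        rw [hrec]
        simp

lemma pvCore (cs : List Char) : pvRecA none cs = pvRecB none (pvChunk cs) := by
  exact pvCore_aux cs.length cs none none le_rfl trivial (by intro _ _ _ h; cases h)

-- ===== VERDICT (by name: the statement is the Claim_ definition above) =====
theorem pascal_to_kebab_spec : Claim_equal_pascal_to_kebab := by
  intro name _
  unfold Spec_pascal_to_kebab
  rw [pvA_char, pvB_char, pvCore]
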